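-- pv_equiv track=rewrite | github.com/nicolagutanu/Uni | semester 1/fundamentals_of_programming/exam_prep/divide_et_impera.py | div_et_imp
-- ===== SOURCE A (Python) =====
-- def div_et_imp(l, st, dr):
--     if st <= dr:
--         mij = (st+dr)//2
--         c = 0
--         if l[mij] % 2 == 0 and mij % 2 == 0:
--             c = l[mij]
--         return c + div_et_imp(l, st, mij-1) + div_et_imp(l, mij+1, dr)
--     else:
--         return 0
-- ===== SOURCE B (Python) =====
-- def div_et_imp(l, st, dr):
--     s = 0
--     for i in range(st, dr + 1):
--         if i % 2 == 0 and l[i] % 2 == 0: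
--             s += l[i]
--     return s
-- ===== Notes on version B (the rewrite author's own statement) =====
-- stated objective: simpler
-- what changed: Replaces the divide-and-conquer recursion with a single iterative loop over the inclusive index range, accumulating the matching values.
import Mathlib
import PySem

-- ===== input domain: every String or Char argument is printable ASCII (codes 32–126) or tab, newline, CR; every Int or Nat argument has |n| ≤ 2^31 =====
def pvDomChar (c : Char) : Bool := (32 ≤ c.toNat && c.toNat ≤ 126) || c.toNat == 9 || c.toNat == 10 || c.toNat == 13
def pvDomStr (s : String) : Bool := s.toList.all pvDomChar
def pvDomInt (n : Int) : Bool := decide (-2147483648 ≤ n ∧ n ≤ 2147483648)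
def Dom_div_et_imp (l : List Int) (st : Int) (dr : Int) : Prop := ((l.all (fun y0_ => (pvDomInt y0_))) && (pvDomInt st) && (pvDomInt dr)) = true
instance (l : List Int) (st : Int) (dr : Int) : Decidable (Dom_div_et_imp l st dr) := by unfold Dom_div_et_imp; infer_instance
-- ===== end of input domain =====

-- B replaces A's divide-and-conquer recursion with a single iterative loop over the
-- inclusive index range (objective: simpler; same values on all inputs where A returns).

-- ===== PORT A =====
def div_et_imp (l : List Int) (st : Int) (dr : Int) : Int :=
  if h : st ≤ dr then
    let mij := PySem.Int.floordiv (st + dr) 2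
    let c : Int :=
      if PySem.Int.mod (PySem.List.pyGetD l mij 0) 2 = 0 ∧ PySem.Int.mod mij 2 = 0 then
        PySem.List.pyGetD l mij 0
      else 0
    c + div_et_imp l st (mij - 1) + div_et_imp l (mij + 1) dr
  else 0
termination_by (dr + 1 - st).toNat
decreasing_by
  all_goals
    have hb := PySem.Int.floordiv_two_mid_bounds (lo := st) (hi := dr) h
    omega

-- ===== PORT B =====
def div_et_imp_alt (l : List Int) (st : Int) (dr : Int) : Int :=
  (PySem.List.pyRange st (dr + 1) 1).foldl
    (fun s i =>
      if PySem.Int.mod i 2 = 0 ∧ PySem.Int.mod (PySem.List.pyGetD l i 0) 2 = 0 then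
        s + PySem.List.pyGetD l i 0
      else s)
    0

-- ===== PRECONDITION & SPEC =====
-- Pre_ excludes exactly the inputs on which A raises IndexError: a non-empty range
-- [st, dr] containing an index outside [-len(l), len(l)) (A evaluates l[mij] at every
-- index of the range).
def Pre_div_et_imp (l : List Int) (st : Int) (dr : Int) : Prop :=
  dr < st ∨ (-(l.length : Int) ≤ st ∧ dr < (l.length : Int))
instance (l : List Int) (st : Int) (dr : Int) : Decidable (Pre_div_et_imp l st dr) := by
  unfold Pre_div_et_imp; infer_instance

def pvWitness_div_et_imp : List Int × Int × Int := ([2, 3, 4, 5, 6], 0, 4)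

def Spec_div_et_imp (l : List Int) (st : Int) (dr : Int) (out : Int) : Prop := out = div_et_imp_alt l st dr
instance (l : List Int) (st : Int) (dr : Int) (out : Int) : Decidable (Spec_div_et_imp l st dr out) := by unfold Spec_div_et_imp; infer_instance

-- ===== CLAIM (what is proved, stated in full; the proofs are below) =====
def Claim_equal_div_et_imp : Prop := ∀ (l : List Int) (st : Int) (dr : Int), Dom_div_et_imp l st dr → Pre_div_et_imp l st dr → Spec_div_et_imp l st dr (div_et_imp l st dr)

-- ===== LEMMAS AND PROOFS =====

-- the contribution of one index, in A's branch order
def pvTerm (l : List Int) (i : Int) : Int :=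
  if PySem.Int.mod (PySem.List.pyGetD l i 0) 2 = 0 ∧ PySem.Int.mod i 2 = 0 then
    PySem.List.pyGetD l i 0
  else 0

theorem alt_eq_sum (l : List Int) (st dr : Int) :
    div_et_imp_alt l st dr = ((PySem.List.pyRange st (dr + 1) 1).map (pvTerm l)).sum := by
  unfold div_et_imp_alt
  have hf : (fun (s : Int) (i : Int) =>
      if PySem.Int.mod i 2 = 0 ∧ PySem.Int.mod (PySem.List.pyGetD l i 0) 2 = 0 then
        s + PySem.List.pyGetD l i 0
      else s) = fun s i => s + pvTerm l i := by
    funext s i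
    unfold pvTerm
    by_cases h1 : PySem.Int.mod i 2 = 0 <;>
      by_cases h2 : PySem.Int.mod (PySem.List.pyGetD l i 0) 2 = 0
    · rw [if_pos ⟨h1, h2⟩, if_pos ⟨h2, h1⟩]
    · rw [if_neg (fun hc => h2 hc.2), if_neg (fun hc => h2 hc.1)]; omega
    · rw [if_neg (fun hc => h1 hc.1), if_neg (fun hc => h1 hc.2)]; omega
    · rw [if_neg (fun hc => h1 hc.1), if_neg (fun hc => h2 hc.1)]; omega
  rw [hf, PySem.List.foldl_add]
  omega

theorem a_eq_sum (l : List Int) : ∀ (n : Nat) (st dr : Int), (dr + 1 - st).toNat = n →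
    div_et_imp l st dr = ((PySem.List.pyRange st (dr + 1) 1).map (pvTerm l)).sum := by
  intro n
  induction n using Nat.strong_induction_on with
  | _ n ih =>
    intro st dr hn
    by_cases h : st ≤ dr
    · have hb := PySem.Int.floordiv_two_mid_bounds (lo := st) (hi := dr) h
      set m := PySem.Int.floordiv (st + dr) 2 with hm
      rw [div_et_imp]
      simp only [h, dif_pos, ← hm]
      rw [ih ((m - 1) + 1 - st).toNat (by omega) st (m - 1) rfl,
          ih (dr + 1 - (m + 1)).toNat (by omega) (m + 1) dr rfl]
      rw [PySem.List.pyRange_one_append st m (dr + 1) (by omega) (by omega),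
          PySem.List.pyRange_one_cons (by omega : m < dr + 1)]
      have hsm : m - 1 + 1 = m := by omega
      rw [hsm]
      simp only [List.map_append, List.map_cons, List.sum_append, List.sum_cons]
      unfold pvTerm
      split_ifs with hc
      · ring
      · ring
    · rw [div_et_imp]
      simp only [h, dif_neg, not_false_iff]
      rw [PySem.List.pyRange_one_eq_nil (by omega)]
      simp

-- ===== VERDICT (by name: the statement is the Claim_ definition above) =====
theorem div_et_imp_spec : Claim_equal_div_et_imp := by
  intro l st dr _ _
  unfold Spec_div_et_imp
  rw [a_eq_sum l (dr + 1 - st).toNat st dr rfl, alt_eq_sum]
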